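-- pv_equiv track=rewrite | github.com/A0339x/patient-investor-digest | scripts/check_publish.py | build_thread_context
-- ===== SOURCE A (Python) =====
-- THREAD_CONTEXT_LIMIT = 12  # number of prior thread messages to include as context
--
-- def build_thread_context(messages, latest_ts):
--     """Return recent thread messages (excluding the message we're responding to and prior app echoes)."""
--     context = []
--     for m in messages:
--         if m.get("ts") == latest_ts:
--             continue
--         role = "Assistant" if m.get("bot_id") else "Gregory"
--         text = (m.get("text") or "").strip()
--         if not text:
--             continue
--         context.append(f"{role}: {text}")
--     return context[-THREAD_CONTEXT_LIMIT:]
-- ===== SOURCE B (Python) =====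
-- THREAD_CONTEXT_LIMIT = 12  # number of prior thread messages to include as context
--
-- def build_thread_context(messages, latest_ts):
--     """Backward bounded scan: collect the last 12 eligible messages and restore order."""
--     collected = []
--     for m in reversed(messages):
--         if len(collected) == THREAD_CONTEXT_LIMIT:
--             break
--         if m.get("ts") == latest_ts:
--             continue
--         text = (m.get("text") or "").strip()
--         if not text:
--             continue
--         role = "Assistant" if m.get("bot_id") else "Gregory"
--         collected.append(f"{role}: {text}")
--     collected.reverse()
--     return collected
-- ===== Notes on version B (the rewrite author's own statement) =====
-- stated objective: alternative
-- what changed: B scans the messages backwards and stops as soon as 12 eligible messages are collected (then reverses), instead of A's full forward pass building the whole context list followed by a [-12:] slice.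
import Mathlib
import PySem

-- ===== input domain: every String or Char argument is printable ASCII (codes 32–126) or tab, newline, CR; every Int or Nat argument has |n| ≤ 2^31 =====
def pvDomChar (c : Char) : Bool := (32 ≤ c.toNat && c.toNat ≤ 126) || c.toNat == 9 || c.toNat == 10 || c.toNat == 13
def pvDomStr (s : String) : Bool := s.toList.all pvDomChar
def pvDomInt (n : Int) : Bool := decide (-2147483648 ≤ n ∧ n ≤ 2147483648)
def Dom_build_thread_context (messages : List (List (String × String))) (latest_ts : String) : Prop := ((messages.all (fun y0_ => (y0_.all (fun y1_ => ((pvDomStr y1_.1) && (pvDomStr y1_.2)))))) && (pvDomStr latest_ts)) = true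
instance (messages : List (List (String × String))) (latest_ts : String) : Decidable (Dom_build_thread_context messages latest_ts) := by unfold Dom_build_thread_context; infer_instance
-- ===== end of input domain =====

-- B replaces A's full forward pass + [-12:] slice by a backward scan that stops after 12 eligible messages; alternative decomposition, same results.


-- ===== PORT A =====
-- full forward pass building `context`, then the slice context[-12:]
def build_thread_context (messages : List (List (String × String))) (latest_ts : String) : List String :=
  let context := messages.foldl (fun context m =>
    if (PySem.Dict.mk m).get? "ts" == some latest_ts then context
    else
      let role := match (PySem.Dict.mk m).get? "bot_id" with
        | some s => if s ≠ "" then "Assistant" else "Gregory"   -- truthiness of the bot_id string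
        | none => "Gregory"
      let text := PySem.Str.strip (((PySem.Dict.mk m).get? "text").getD "")
      if text == "" then context
      else context ++ [role ++ ": " ++ text]) []
  PySem.List.slice context (some (-12)) none

-- ===== PORT B =====
-- backward scan with early stop at 12 collected items (the `break`), then reverse
def pvAltGo (latest_ts : String) : List (List (String × String)) → List String → List String
  | [], collected => collected
  | m :: rest, collected =>
    if collected.length == 12 then collected
    else if (PySem.Dict.mk m).get? "ts" == some latest_ts then pvAltGo latest_ts rest collected
    else
      let text := PySem.Str.strip (((PySem.Dict.mk m).get? "text").getD "")
      if text == "" then pvAltGo latest_ts rest collected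
      else
        let role := match (PySem.Dict.mk m).get? "bot_id" with
          | some s => if s ≠ "" then "Assistant" else "Gregory"
          | none => "Gregory"
        pvAltGo latest_ts rest (collected ++ [role ++ ": " ++ text])

def build_thread_context_alt (messages : List (List (String × String))) (latest_ts : String) : List String :=
  (pvAltGo latest_ts messages.reverse []).reverse

-- ===== PRECONDITION & SPEC =====
def Spec_build_thread_context (messages : List (List (String × String))) (latest_ts : String) (out : List String) : Prop := out = build_thread_context_alt messages latest_ts
instance (messages : List (List (String × String))) (latest_ts : String) (out : List String) : Decidable (Spec_build_thread_context messages latest_ts out) := by unfold Spec_build_thread_context; infer_instance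

-- ===== CLAIM (what is proved, stated in full; the proofs are below) =====
def Claim_equal_build_thread_context : Prop := ∀ (messages : List (List (String × String))) (latest_ts : String), Dom_build_thread_context messages latest_ts → Spec_build_thread_context messages latest_ts (build_thread_context messages latest_ts)

-- ===== LEMMAS AND PROOFS =====

-- the per-message result both programs compute: none = skipped, some s = the formatted line
def pvF (latest_ts : String) (m : List (String × String)) : Option String :=
  if (PySem.Dict.mk m).get? "ts" == some latest_ts then none
  else
    let text := PySem.Str.strip (((PySem.Dict.mk m).get? "text").getD "")
    if text == "" then none
    else
      let role := match (PySem.Dict.mk m).get? "bot_id" with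
        | some s => if s ≠ "" then "Assistant" else "Gregory"
        | none => "Gregory"
      some (role ++ ": " ++ text)

-- A's loop body, named so the foldl lemma can be stated about it
def pvStepA (latest_ts : String) (context : List String) (m : List (String × String)) : List String :=
  if (PySem.Dict.mk m).get? "ts" == some latest_ts then context
  else
    let role := match (PySem.Dict.mk m).get? "bot_id" with
      | some s => if s ≠ "" then "Assistant" else "Gregory"
      | none => "Gregory"
    let text := PySem.Str.strip (((PySem.Dict.mk m).get? "text").getD "")
    if text == "" then context
    else context ++ [role ++ ": " ++ text]

theorem pvStepA_eq (latest_ts : String) (acc : List String) (m : List (String × String)) :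
    pvStepA latest_ts acc m = acc ++ (pvF latest_ts m).toList := by
  unfold pvStepA pvF
  by_cases h1 : ((PySem.Dict.mk m).get? "ts" == some latest_ts) = true
  · simp [h1]
  · by_cases h2 : (PySem.Str.strip (((PySem.Dict.mk m).get? "text").getD "") == "") = true
    · simp [h1, h2]
    · simp [h1, h2]

theorem pvStepA_foldl (latest_ts : String) (xs : List (List (String × String))) (acc : List String) :
    xs.foldl (pvStepA latest_ts) acc = acc ++ xs.filterMap (pvF latest_ts) := by
  induction xs generalizing acc with
  | nil => simp
  | cons m rest ih =>
    rw [List.foldl_cons, pvStepA_eq, ih, List.filterMap_cons]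
    cases hm : pvF latest_ts m <;> simp

theorem pvAltGo_cons (latest_ts : String) (m : List (String × String))
    (rest : List (List (String × String))) (acc : List String) (hlt : acc.length < 12) :
    pvAltGo latest_ts (m :: rest) acc = pvAltGo latest_ts rest (acc ++ (pvF latest_ts m).toList) := by
  have hne : (acc.length == 12) = false := by simp; omega
  simp only [pvAltGo, hne, Bool.false_eq_true, if_false]
  by_cases h1 : ((PySem.Dict.mk m).get? "ts" == some latest_ts) = true
  · simp [pvF, h1]
  · by_cases h2 : (PySem.Str.strip (((PySem.Dict.mk m).get? "text").getD "") == "") = true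
    · simp [pvF, h1, h2]
    · simp [pvF, h1, h2]

theorem pvAltGo_eq (latest_ts : String) (xs : List (List (String × String))) (acc : List String)
    (h : acc.length ≤ 12) :
    pvAltGo latest_ts xs acc = acc ++ (xs.filterMap (pvF latest_ts)).take (12 - acc.length) := by
  induction xs generalizing acc with
  | nil => simp [pvAltGo]
  | cons m rest ih =>
    by_cases hfull : acc.length = 12
    · simp [pvAltGo, hfull]
    · have hlt : acc.length < 12 := by omega
      rw [pvAltGo_cons latest_ts m rest acc hlt]
      cases hm : pvF latest_ts m with
      | none =>
        simp only [Option.toList_none, List.append_nil]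
        rw [ih acc h, List.filterMap_cons, hm]
      | some s =>
        simp only [Option.toList_some]
        have hlen : (acc ++ [s]).length ≤ 12 := by simp; omega
        rw [ih _ hlen, List.filterMap_cons, hm]
        have h12 : 12 - acc.length = (12 - (acc ++ [s]).length) + 1 := by simp; omega
        rw [h12, List.take_succ_cons]
        simp

theorem pvB_closed (messages : List (List (String × String))) (latest_ts : String) :
    build_thread_context_alt messages latest_ts
      = ((messages.filterMap (pvF latest_ts)).reverse.take 12).reverse := by
  unfold build_thread_context_alt
  rw [pvAltGo_eq latest_ts messages.reverse [] (by simp)]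
  simp

-- ===== VERDICT (by name: the statement is the Claim_ definition above) =====
theorem build_thread_context_spec : Claim_equal_build_thread_context := by
  intro messages latest_ts _
  unfold Spec_build_thread_context build_thread_context
  have hstep : (fun (context : List String) (m : List (String × String)) =>
      if (PySem.Dict.mk m).get? "ts" == some latest_ts then context
      else
        let role := match (PySem.Dict.mk m).get? "bot_id" with
          | some s => if s ≠ "" then "Assistant" else "Gregory"
          | none => "Gregory"
        let text := PySem.Str.strip (((PySem.Dict.mk m).get? "text").getD "")
        if text == "" then context
        else context ++ [role ++ ": " ++ text]) = pvStepA latest_ts := rfl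
  rw [hstep, pvStepA_foldl, pvB_closed]
  rw [PySem.List.slice_from_neg_ofNat _ 12 (by omega)]
  simp [List.take_reverse]
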